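-- pv_equiv track=rewrite | github.com/Ashit-10/PYTHON_OMR_APP | scan100.py | opposite_pattern
-- ===== SOURCE A (Python) =====
-- def opposite_pattern(img_no):
--     if img_no == 5  or img_no == 6:
--         start = (img_no - 1) * 20 + 1
--         end = start + 10
--         combined_set = list(range(start, end))
--     else:
--         start1 = (img_no - 1) * 20 + 1
--         start2 = start1 + 10
--
--         first_set = list(range(start1, start1 + 10))
--         second_set = list(range(start2, start2 + 10))
--
--         combined_set = []
--         for i in range(10):
--             combined_set.append(first_set[i])
--             combined_set.append(second_set[i])
--
--     return combined_set
-- ===== SOURCE B (Python) =====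
-- def opposite_pattern(img_no):
--     if img_no == 5 or img_no == 6:
--         start = (img_no - 1) * 20 + 1
--         return list(range(start, start + 10))
--     else:
--         start1 = (img_no - 1) * 20 + 1
--         return [start1 + i // 2 + (i % 2) * 10 for i in range(20)]
-- ===== Notes on version B (the rewrite author's own statement) =====
-- stated objective: simpler
-- what changed: The else branch builds the interleaved list in one pass from the closed-form index start1 + i//2 + (i%2)*10 over range(20), eliminating the two intermediate lists and the interleaving append loop.
import Mathlib
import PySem

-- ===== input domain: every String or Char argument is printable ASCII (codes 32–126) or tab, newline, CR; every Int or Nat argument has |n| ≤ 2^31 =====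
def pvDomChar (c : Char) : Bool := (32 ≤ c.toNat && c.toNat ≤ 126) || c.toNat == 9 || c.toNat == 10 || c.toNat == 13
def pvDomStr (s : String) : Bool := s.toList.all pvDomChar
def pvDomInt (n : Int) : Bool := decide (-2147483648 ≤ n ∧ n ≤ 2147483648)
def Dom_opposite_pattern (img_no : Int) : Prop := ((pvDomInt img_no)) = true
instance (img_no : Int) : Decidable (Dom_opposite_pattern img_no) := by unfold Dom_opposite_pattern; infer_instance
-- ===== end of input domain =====

-- B replaces the two intermediate lists and the interleave loop of A's else branch by one
-- single-pass closed-form comprehension start1 + i//2 + (i%2)*10 over range(20) (simpler, same cost).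

-- ===== PORT A =====
def opposite_pattern (img_no : Int) : List Int :=
  if img_no == 5 || img_no == 6 then
    let start := (img_no - 1) * 20 + 1
    let «end» := start + 10
    PySem.List.pyRange start «end» 1
  else
    let start1 := (img_no - 1) * 20 + 1
    let start2 := start1 + 10
    let first_set := PySem.List.pyRange start1 (start1 + 10) 1
    let second_set := PySem.List.pyRange start2 (start2 + 10) 1
    -- first_set[i]/second_set[i]: i ∈ range(10), lists have length 10, so the pyGetD default is never used (exact)
    (PySem.List.pyRange 0 10 1).foldl
      (fun acc i => (acc ++ [PySem.List.pyGetD first_set i 0]) ++ [PySem.List.pyGetD second_set i 0]) []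

-- ===== PORT B =====
def opposite_pattern_alt (img_no : Int) : List Int :=
  if img_no == 5 || img_no == 6 then
    let start := (img_no - 1) * 20 + 1
    PySem.List.pyRange start (start + 10) 1
  else
    let start1 := (img_no - 1) * 20 + 1
    (PySem.List.pyRange 0 20 1).map
      (fun i => start1 + PySem.Int.floordiv i 2 + PySem.Int.mod i 2 * 10)

-- ===== PRECONDITION & SPEC =====
def Spec_opposite_pattern (img_no : Int) (out : List Int) : Prop := out = opposite_pattern_alt img_no
instance (img_no : Int) (out : List Int) : Decidable (Spec_opposite_pattern img_no out) := by unfold Spec_opposite_pattern; infer_instance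

-- ===== CLAIM (what is proved, stated in full; the proofs are below) =====
def Claim_equal_opposite_pattern : Prop := ∀ (img_no : Int), Dom_opposite_pattern img_no → Spec_opposite_pattern img_no (opposite_pattern img_no)

-- ===== LEMMAS AND PROOFS =====

lemma pyRange10 (s : Int) : PySem.List.pyRange s (s + 10) 1 =
    [s, s+1, s+2, s+3, s+4, s+5, s+6, s+7, s+8, s+9] := by
  rw [PySem.List.pyRange_one]
  norm_num [show Int.toNat 10 = 10 from rfl, List.range_succ]

-- ===== VERDICT (by name: the statement is the Claim_ definition above) =====
theorem opposite_pattern_spec : Claim_equal_opposite_pattern := by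
  intro img_no _
  unfold Spec_opposite_pattern opposite_pattern opposite_pattern_alt
  split_ifs with h
  · rfl
  · have h10 : PySem.List.pyRange 0 10 1 = [0,1,2,3,4,5,6,7,8,9] := by decide
    have h20 : PySem.List.pyRange 0 20 1 =
        [0,1,2,3,4,5,6,7,8,9,10,11,12,13,14,15,16,17,18,19] := by decide
    simp only [pyRange10, h10, h20, List.foldl, List.map]
    norm_num [PySem.List.pyGetD, PySem.Int.floordiv, PySem.Int.mod]
    ring_nf
    and_intros <;> norm_num [Int.toNat, Int.fdiv, Int.fmod] <;> try ring
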